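-- pv_equiv track=rewrite | github.com/ZzzMarlik/CSC108_Python | CSC108_16F/A3/tweets.py | get_unique_key
-- ===== SOURCE A (Python) =====
-- def get_unique_key(dic):
--     '''(dict of {str: list of str}) -> dict of {str: list of str}
--
--     Return the dictionary that only can contains keys that are only assigned to
--     one value.
--
--     >>> get_unique_tag({'x': ['1', '2'], 'y': ['3']})
--     {'y': ['3']}
--     >>> get_unique_tag({'x': ['1', '2'], 'y': ['3', '4']})
--     {}
--     '''
--     acc = []
--     for key in dic:
--         if len(dic[key]) > 1:
--             acc.append(key)
--     for item in acc:
--         dic.pop(item)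
--     return dic
-- ===== SOURCE B (Python) =====
-- def get_unique_key(dic):
--     # Fixpoint deletion: repeatedly scan for the first key whose value list has
--     # more than one element and delete it, until no such key remains.
--     while True:
--         bad = next((k for k, v in dic.items() if len(v) > 1), None)
--         if bad is None:
--             return dic
--         del dic[bad]
-- ===== Notes on version B (the rewrite author's own statement) =====
-- stated objective: alternative
-- what changed: Replaces the collect-bad-keys-then-pop single pass with a fixpoint loop that repeatedly scans for the first offending key and deletes it until none remains.
import Mathlib
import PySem

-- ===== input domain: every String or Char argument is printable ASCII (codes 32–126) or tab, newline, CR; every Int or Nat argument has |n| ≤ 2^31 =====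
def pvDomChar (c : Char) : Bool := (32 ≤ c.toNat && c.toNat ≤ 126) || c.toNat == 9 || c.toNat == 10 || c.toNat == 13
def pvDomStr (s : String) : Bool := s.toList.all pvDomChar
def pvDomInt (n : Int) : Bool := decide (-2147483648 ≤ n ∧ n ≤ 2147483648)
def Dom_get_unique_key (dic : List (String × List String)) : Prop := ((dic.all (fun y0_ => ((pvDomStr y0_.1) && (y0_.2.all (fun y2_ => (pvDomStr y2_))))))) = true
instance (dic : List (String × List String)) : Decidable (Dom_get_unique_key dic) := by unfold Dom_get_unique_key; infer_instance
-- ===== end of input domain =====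

-- B replaces A's collect-bad-keys-then-pop single pass with a fixpoint loop that repeatedly
-- scans for the first offending key and deletes it until none remains. Both A and B mutate
-- the argument dict in place; the equivalence proved here is about the RETURN value only.

-- ===== PORT A =====
-- dic[key]: first-match lookup in the association list (key always present when used here)
def pyLookup (dic : List (String × List String)) (k : String) : List String :=
  ((dic.find? (fun p => p.1 == k)).map Prod.snd).getD []

def get_unique_key (dic : List (String × List String)) : List (String × List String) :=
  -- acc = []; for key in dic: if len(dic[key]) > 1: acc.append(key)
  let acc := (dic.map Prod.fst).foldl
    (fun acc key => if (pyLookup dic key).length > 1 then acc ++ [key] else acc) []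
  -- for item in acc: dic.pop(item)   (pop removes the (unique) entry with that key)
  acc.foldl (fun d item => d.eraseP (fun p => p.1 == item)) dic

-- ===== PORT B =====
def get_unique_key_alt (dic : List (String × List String)) : List (String × List String) :=
  -- bad = next((k for k, v in dic.items() if len(v) > 1), None)
  match h : dic.find? (fun p => p.2.length > 1) with
  | none => dic                                        -- if bad is None: return dic
  | some p => get_unique_key_alt (dic.eraseP (fun q => q.1 == p.1))   -- del dic[bad]; loop
termination_by dic.length
decreasing_by
  have := List.length_eraseP_add_one (p := fun q => q.1 == p.1)
    (List.mem_of_find?_eq_some h) (by simp)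
  omega

-- ===== PRECONDITION & SPEC =====
-- Pre_ requires distinct keys: the argument represents a Python dict, whose keys are
-- necessarily distinct; duplicate-key association lists correspond to no Python input.
def Pre_get_unique_key (dic : List (String × List String)) : Prop :=
  (dic.map Prod.fst).Nodup
instance (dic : List (String × List String)) : Decidable (Pre_get_unique_key dic) := by
  unfold Pre_get_unique_key; infer_instance

def pvWitness_get_unique_key : (List (String × List String)) :=
  [("x", ["1", "2"]), ("y", ["3"])]

def Spec_get_unique_key (dic : List (String × List String)) (out : List (String × List String)) : Prop := out = get_unique_key_alt dic
instance (dic : List (String × List String)) (out : List (String × List String)) : Decidable (Spec_get_unique_key dic out) := by unfold Spec_get_unique_key; infer_instance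

-- ===== CLAIM (what is proved, stated in full; the proofs are below) =====
def Claim_equal_get_unique_key : Prop := ∀ (dic : List (String × List String)), Dom_get_unique_key dic → Pre_get_unique_key dic → Spec_get_unique_key dic (get_unique_key dic)

-- ===== LEMMAS AND PROOFS =====

-- With distinct keys, the lookup at a member's key returns that member's value.
theorem pyLookup_of_mem (dic : List (String × List String)) (p : String × List String)
    (hn : (dic.map Prod.fst).Nodup) (hp : p ∈ dic) : pyLookup dic p.1 = p.2 := by
  induction dic with
  | nil => cases hp
  | cons q rest ih =>
    simp only [List.map_cons, List.nodup_cons] at hn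
    rcases List.mem_cons.mp hp with h | h
    · subst h; simp [pyLookup]
    · have hne : q.1 ≠ p.1 := by
        intro he; exact hn.1 (he ▸ List.mem_map_of_mem h)
      simp only [pyLookup, List.find?_cons]
      rw [show (q.1 == p.1) = false from beq_eq_false_iff_ne.mpr hne]
      exact ih hn.2 h

-- The append-if loop over a list is filter.
theorem foldl_append_if_filter {α : Type} (q : α → Prop) [DecidablePred q] (l : List α) (acc : List α) :
    l.foldl (fun acc x => if q x then acc ++ [x] else acc) acc = acc ++ l.filter (fun x => decide (q x)) := by
  induction l generalizing acc with
  | nil => simp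
  | cons x xs ih =>
    by_cases h : q x
    · simp [List.foldl_cons, h, ih]
    · simp [List.foldl_cons, h, ih]

-- With distinct keys, two members with the same key are the same pair.
theorem eq_of_mem_of_fst_eq (d : List (String × List String)) (q p : String × List String)
    (hn : (d.map Prod.fst).Nodup) (hq : q ∈ d) (hp : p ∈ d) (h : q.1 = p.1) : q = p := by
  rcases List.mem_iff_getElem.mp hq with ⟨i, hi, hiq⟩
  rcases List.mem_iff_getElem.mp hp with ⟨j, hj, hjp⟩
  have hij : i = j := by
    have := List.Nodup.getElem_inj_iff (hn) (i := i) (j := j)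
      (hi := by simpa using hi) (hj := by simpa using hj)
    apply this.mp
    simp only [List.getElem_map, hiq, hjp, h]
  subst hij
  rw [← hiq, ← hjp]

-- With distinct keys, eraseP of a key is filter (the key occurs at most once).
theorem eraseP_key_eq_filter (d : List (String × List String)) (k : String)
    (hn : (d.map Prod.fst).Nodup) :
    d.eraseP (fun p => p.1 == k) = d.filter (fun p => !(p.1 == k)) := by
  induction d with
  | nil => rfl
  | cons q rest ih =>
    simp only [List.map_cons, List.nodup_cons] at hn
    by_cases h : q.1 = k
    · rw [List.eraseP_cons, List.filter_cons]
      simp only [h, beq_self_eq_true, Bool.not_true, cond_true]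
      have : rest.filter (fun p => !(p.1 == k)) = rest := by
        apply List.filter_eq_self.mpr
        intro p hp
        have : p.1 ≠ k := by
          intro he
          exact hn.1 (by rw [h]; exact he ▸ List.mem_map_of_mem hp)
        simp [this]
      rw [this]
      simp
    · rw [List.eraseP_cons, List.filter_cons]
      have hb : (q.1 == k) = false := beq_eq_false_iff_ne.mpr h
      simp only [hb, Bool.not_false, cond_false, if_true]
      rw [ih hn.2]

-- Filtering preserves key-nodup.
theorem nodup_keys_filter (d : List (String × List String)) (q : String × List String → Bool)
    (hn : (d.map Prod.fst).Nodup) : ((d.filter q).map Prod.fst).Nodup := by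
  exact List.Sublist.nodup (List.Sublist.map Prod.fst List.filter_sublist) hn

-- Erasing each key of ks in turn is one filter on key-membership in ks.
theorem foldl_eraseP_eq_filter (ks : List String) (d : List (String × List String))
    (hn : (d.map Prod.fst).Nodup) :
    ks.foldl (fun d item => d.eraseP (fun p => p.1 == item)) d
      = d.filter (fun p => !(ks.contains p.1)) := by
  induction ks generalizing d with
  | nil => simp
  | cons k ks ih =>
    rw [List.foldl_cons, eraseP_key_eq_filter d k hn,
        ih _ (nodup_keys_filter d _ hn), List.filter_filter]
    apply List.filter_congr
    intro p _
    by_cases h : p.1 = k <;> simp [h]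

-- A's result, characterised: under distinct keys it is the ≤1-filter.
theorem get_unique_key_eq_filter (dic : List (String × List String))
    (hn : (dic.map Prod.fst).Nodup) :
    get_unique_key dic = dic.filter (fun p => p.2.length ≤ 1) := by
  unfold get_unique_key
  have hacc : (dic.map Prod.fst).foldl
      (fun acc key => if (pyLookup dic key).length > 1 then acc ++ [key] else acc) []
      = (dic.filter (fun p => decide (p.2.length > 1))).map Prod.fst := by
    rw [foldl_append_if_filter (fun key => (pyLookup dic key).length > 1), List.nil_append,
        List.filter_map]
    apply congrArg (List.map Prod.fst)
    apply List.filter_congr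
    intro p hp
    simp [Function.comp, pyLookup_of_mem dic p hn hp]
  rw [hacc, foldl_eraseP_eq_filter _ _ hn]
  apply List.filter_congr
  intro p hp
  have hmem : p.1 ∈ (dic.filter (fun p => decide (p.2.length > 1))).map Prod.fst ↔ 1 < p.2.length := by
    constructor
    · intro h
      rcases List.mem_map.mp h with ⟨q, hq, hqe⟩
      have hq' := List.mem_filter.mp hq
      have : q = p := eq_of_mem_of_fst_eq dic q p hn hq'.1 hp hqe
      have := hq'.2
      subst q
      simpa using this
    · intro h
      exact List.mem_map.mpr ⟨p, List.mem_filter.mpr ⟨hp, by simpa using h⟩, rfl⟩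
  rw [Bool.eq_iff_iff]
  simp [List.contains_eq_mem, hmem]

-- B's result, characterised: under distinct keys the fixpoint deletion is the ≤1-filter.
theorem get_unique_key_alt_eq_filter (dic : List (String × List String))
    (hn : (dic.map Prod.fst).Nodup) :
    get_unique_key_alt dic = dic.filter (fun p => p.2.length ≤ 1) := by
  fun_induction get_unique_key_alt dic with
  | case1 dic h =>
    symm
    apply List.filter_eq_self.mpr
    intro p hp
    have := List.find?_eq_none.mp h p hp
    simp only [decide_eq_true_eq, Nat.not_lt] at this
    simpa using this
  | case2 dic p h ih =>
    have hp : p ∈ dic := List.mem_of_find?_eq_some h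
    have hplen : 1 < p.2.length := by simpa using List.find?_some h
    rw [eraseP_key_eq_filter dic p.1 hn] at ih ⊢
    rw [ih (nodup_keys_filter dic _ hn), List.filter_filter]
    apply List.filter_congr
    intro q hq
    by_cases hk : q.1 = p.1
    · have : q = p := eq_of_mem_of_fst_eq dic q p hn hq hp hk
      subst this
      simp [Nat.not_le.mpr hplen]
    · simp [hk]

-- ===== VERDICT (by name: the statement is the Claim_ definition above) =====
theorem get_unique_key_spec : Claim_equal_get_unique_key := by
  intro dic _ hpre
  unfold Spec_get_unique_key
  rw [get_unique_key_eq_filter dic hpre, get_unique_key_alt_eq_filter dic hpre]
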